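-- pv_equiv track=rewrite | github.com/AdrianUbedaTouati/TFG-FR | IA_Meteorologica/Redes/N-BEATS/Multivariable/Largo_con_random/neutral/nbeats_multivar_h_24_l_336.py | detect_target_col
-- ===== SOURCE A (Python) =====
-- def detect_target_col(cols):
--     ranked = []
--     for c in cols:
--         cl = str(c).lower()
--         score = 0
--         if "temp" in cl: score += 2
--         if "_z" in cl or "norm" in cl or "normalized" in cl: score += 1
--         if "temperature" in cl: score += 1
--         if score > 0:
--             ranked.append((score, c))
--     if ranked:
--         ranked.sort(reverse=True)
--         return ranked[0][1]
--     return None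
-- ===== SOURCE B (Python) =====
-- def _score(cl):
--     score = 0
--     if "temp" in cl: score += 2
--     if "_z" in cl or "norm" in cl or "normalized" in cl: score += 1
--     if "temperature" in cl: score += 1
--     return score
--
-- def detect_target_col(cols):
--     best = None
--     for c in cols:
--         score = _score(str(c).lower())
--         if score > 0:
--             cand = (score, c)
--             if best is None or cand > best:
--                 best = cand
--     return best[1] if best is not None else None
-- ===== Notes on version B (the rewrite author's own statement) =====
-- stated objective: alternative
-- what changed: B drops the ranked list and the reverse sort, keeping a single running-best (score, name) tuple under Python's lexicographic tuple comparison in one pass; per-column keyword scoring dominates runtime, so the cost is similar.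
import Mathlib
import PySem

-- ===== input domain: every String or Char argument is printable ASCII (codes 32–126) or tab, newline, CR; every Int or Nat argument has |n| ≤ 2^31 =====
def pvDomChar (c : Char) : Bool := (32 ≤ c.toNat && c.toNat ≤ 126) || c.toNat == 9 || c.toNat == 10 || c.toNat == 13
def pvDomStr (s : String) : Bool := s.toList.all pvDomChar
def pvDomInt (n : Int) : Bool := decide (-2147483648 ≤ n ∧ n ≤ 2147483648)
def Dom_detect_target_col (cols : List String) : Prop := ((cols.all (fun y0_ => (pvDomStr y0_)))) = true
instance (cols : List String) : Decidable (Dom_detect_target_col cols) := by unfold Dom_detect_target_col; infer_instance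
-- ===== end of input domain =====

-- B replaces A's build-list + reverse-sort + take-first with a single running-best pass
-- over the columns, keeping the same (score, name) lexicographic tie-break (objective:
-- alternative algorithm; the per-column keyword scoring dominates, so cost is similar).


-- ===== PORT A =====
-- literal transliteration of A: build 'ranked', sort it reverse=True (Python tuple order
-- = lexicographic (score, name), hence PySem.List.sorted2 on fst/snd), return ranked[0][1]
def detect_target_col (cols : List String) : Option String :=
  let ranked : List (Int × String) := cols.foldl (fun ranked c =>
    let cl := PySem.Str.lower c
    let score : Int := 0
    let score := if PySem.Str.isIn "temp" cl then score + 2 else score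
    let score := if PySem.Str.isIn "_z" cl || PySem.Str.isIn "norm" cl || PySem.Str.isIn "normalized" cl then score + 1 else score
    let score := if PySem.Str.isIn "temperature" cl then score + 1 else score
    if score > 0 then ranked ++ [(score, c)] else ranked) []
  if !ranked.isEmpty then
    -- ranked.sort(reverse=True); return ranked[0][1] (ranked is nonempty here)
    match PySem.List.sorted2 ranked Prod.fst Prod.snd true with
    | p :: _ => some p.2
    | [] => none
  else
    none

-- ===== PORT B =====
-- Source B's helper _score(cl)
def pvScoreB (cl : String) : Int :=
  let score : Int := 0
  let score := if PySem.Str.isIn "temp" cl then score + 2 else score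
  let score := if PySem.Str.isIn "_z" cl || PySem.Str.isIn "norm" cl || PySem.Str.isIn "normalized" cl then score + 1 else score
  let score := if PySem.Str.isIn "temperature" cl then score + 1 else score
  score

-- single pass keeping the best (score, name) pair; 'cand > best' is Python's
-- lexicographic tuple comparison, written out on the two components
def detect_target_col_alt (cols : List String) : Option String :=
  let best : Option (Int × String) := cols.foldl (fun best c =>
    let score := pvScoreB (PySem.Str.lower c)
    if score > 0 then
      let cand : Int × String := (score, c)
      match best with
      | none => some cand
      | some b =>
          if decide (b.1 < cand.1) || (!decide (cand.1 < b.1) && decide (b.2 < cand.2)) then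
            some cand
          else best
    else best) none
  match best with
  | some b => some b.2
  | none => none

-- ===== PRECONDITION & SPEC =====
def Spec_detect_target_col (cols : List String) (out : Option String) : Prop := out = detect_target_col_alt cols
instance (cols : List String) (out : Option String) : Decidable (Spec_detect_target_col cols out) := by unfold Spec_detect_target_col; infer_instance

-- ===== CLAIM (what is proved, stated in full; the proofs are below) =====
def Claim_equal_detect_target_col : Prop := ∀ (cols : List String), Dom_detect_target_col cols → Spec_detect_target_col cols (detect_target_col cols)

-- ===== LEMMAS AND PROOFS =====

-- Python's 'best < cand' on (int, str) tuples, as sorted2's internal comparison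
def pvLt (a b : Int × String) : Bool :=
  decide (a.1 < b.1) || (!decide (b.1 < a.1) && decide (a.2 < b.2))

-- B's loop step, abstracted
def pvMaxStep (o : Option (Int × String)) (x : Int × String) : Option (Int × String) :=
  match o with
  | none => some x
  | some m => if pvLt m x then some x else some m

theorem pvHead_insertBy (x : Int × String) (acc : List (Int × String)) :
    (PySem.List.insertBy (fun a b => pvLt b a) x acc).head? = pvMaxStep acc.head? x := by
  cases acc with
  | nil => rfl
  | cons y ys =>
      simp only [PySem.List.insertBy, pvMaxStep]
      by_cases h : pvLt y x
      · simp [h]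
      · simp [h]

theorem pvHead_foldl_insertBy (xs : List (Int × String)) (acc : List (Int × String)) :
    (xs.foldl (fun acc x => PySem.List.insertBy (fun a b => pvLt b a) x acc) acc).head?
      = xs.foldl pvMaxStep acc.head? := by
  induction xs generalizing acc with
  | nil => rfl
  | cons x t ih =>
      simp only [List.foldl_cons]
      rw [ih, pvHead_insertBy]

theorem pvHead_sorted2 (l : List (Int × String)) :
    (PySem.List.sorted2 l Prod.fst Prod.snd true).head? = l.foldl pvMaxStep none := by
  have h : PySem.List.sorted2 l Prod.fst Prod.snd true
      = l.foldl (fun acc x => PySem.List.insertBy (fun a b => pvLt b a) x acc) [] := rfl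
  rw [h, pvHead_foldl_insertBy]
  rfl

-- A's tail (reverse-sort then first element's name) is the running max of pvMaxStep
theorem pvFinal (R : List (Int × String)) :
    (if !R.isEmpty then
        match PySem.List.sorted2 R Prod.fst Prod.snd true with
        | p :: _ => some p.2
        | [] => none
      else none)
      = (R.foldl pvMaxStep none).map Prod.snd := by
  cases R with
  | nil => rfl
  | cons a t =>
      rw [← pvHead_sorted2]
      simp only [List.isEmpty_cons, Bool.not_false, if_true]
      cases PySem.List.sorted2 (a :: t) Prod.fst Prod.snd true <;> rfl

-- the inline loop step of B's port, with the tuple comparison folded into pvMaxStep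
theorem pvStepB_eq (best : Option (Int × String)) (c : String) :
    (let score := pvScoreB (PySem.Str.lower c)
     if score > 0 then
       let cand : Int × String := (score, c)
       match best with
       | none => some cand
       | some b =>
           if decide (b.1 < cand.1) || (!decide (cand.1 < b.1) && decide (b.2 < cand.2)) then
             some cand
           else best
     else best)
    = (if pvScoreB (PySem.Str.lower c) > 0 then pvMaxStep best (pvScoreB (PySem.Str.lower c), c) else best) := by
  cases best <;> rfl

-- ===== VERDICT (by name: the statement is the Claim_ definition above) =====
theorem detect_target_col_spec : Claim_equal_detect_target_col := by
  intro cols _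
  unfold Spec_detect_target_col
  have hB : detect_target_col_alt cols
      = ((cols.foldl (fun best c =>
          if pvScoreB (PySem.Str.lower c) > 0 then pvMaxStep best (pvScoreB (PySem.Str.lower c), c) else best)
          (none : Option (Int × String))).map Prod.snd) := by
    rw [show detect_target_col_alt cols
        = (match cols.foldl (fun best c =>
            let score := pvScoreB (PySem.Str.lower c)
            if score > 0 then
              let cand : Int × String := (score, c)
              match best with
              | none => some cand
              | some b =>
                  if decide (b.1 < cand.1) || (!decide (cand.1 < b.1) && decide (b.2 < cand.2)) then
                    some cand
                  else best
            else best) (none : Option (Int × String)) with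
           | some b => some b.2
           | none => none) from rfl]
    rw [PySem.List.foldl_congr_mem cols _
          (fun best c =>
            if pvScoreB (PySem.Str.lower c) > 0 then pvMaxStep best (pvScoreB (PySem.Str.lower c), c) else best)
          (none : Option (Int × String))
          (fun best c _ => pvStepB_eq best c)]
    generalize (cols.foldl (fun best c =>
        if pvScoreB (PySem.Str.lower c) > 0 then pvMaxStep best (pvScoreB (PySem.Str.lower c), c) else best)
        (none : Option (Int × String))) = o
    cases o <;> rfl
  rw [hB,
    show detect_target_col cols
      = (if !((cols.foldl (fun ranked c =>
            if pvScoreB (PySem.Str.lower c) > 0 then ranked ++ [(pvScoreB (PySem.Str.lower c), c)] else ranked)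
            ([] : List (Int × String))).isEmpty) then
          match PySem.List.sorted2 (cols.foldl (fun ranked c =>
            if pvScoreB (PySem.Str.lower c) > 0 then ranked ++ [(pvScoreB (PySem.Str.lower c), c)] else ranked)
            ([] : List (Int × String))) Prod.fst Prod.snd true with
          | p :: _ => some p.2
          | [] => none
        else none) from rfl,
    PySem.List.foldl_append_ite (p := fun c => pvScoreB (PySem.Str.lower c) > 0)
      (f := fun c => (pvScoreB (PySem.Str.lower c), c)),
    PySem.List.foldl_ite_eq_foldl_filter (p := fun c => pvScoreB (PySem.Str.lower c) > 0),
    ← List.foldl_map (f := fun c => (pvScoreB (PySem.Str.lower c), c)) (g := pvMaxStep)]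
  exact pvFinal _
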